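-- pv_equiv track=rewrite | github.com/loweege/SAT-with-Binary-Decision-Diagrams | model-checking/sol.py | element_scanned_in_a_clause
-- ===== SOURCE A (Python) =====
-- def element_scanned_in_a_clause(clause, E, FE):
--     counter = 0
--     for literal in clause:
--         for el in E:
--             if abs(el) == abs(literal):
--                 counter += 1
--         for el in FE:
--             if abs(el) == abs(literal):
--                 counter += 1
--     return counter
-- ===== SOURCE B (Python) =====
-- def element_scanned_in_a_clause(clause, E, FE):
--     cl = {}
--     for l in clause:
--         v = abs(l)
--         cl[v] = cl.get(v, 0) + 1
--     tab = {}
--     for x in E: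
--         v = abs(x)
--         tab[v] = tab.get(v, 0) + 1
--     for x in FE:
--         v = abs(x)
--         tab[v] = tab.get(v, 0) + 1
--     return sum(n * tab.get(v, 0) for v, n in cl.items())
-- ===== Notes on version B (the rewrite author's own statement) =====
-- stated objective: faster
-- what changed: Replaces the per-literal scans of E and FE by frequency tables over absolute values built once, returning the dot-product sum n * tab[v] over the distinct abs-values of the clause.
import Mathlib
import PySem

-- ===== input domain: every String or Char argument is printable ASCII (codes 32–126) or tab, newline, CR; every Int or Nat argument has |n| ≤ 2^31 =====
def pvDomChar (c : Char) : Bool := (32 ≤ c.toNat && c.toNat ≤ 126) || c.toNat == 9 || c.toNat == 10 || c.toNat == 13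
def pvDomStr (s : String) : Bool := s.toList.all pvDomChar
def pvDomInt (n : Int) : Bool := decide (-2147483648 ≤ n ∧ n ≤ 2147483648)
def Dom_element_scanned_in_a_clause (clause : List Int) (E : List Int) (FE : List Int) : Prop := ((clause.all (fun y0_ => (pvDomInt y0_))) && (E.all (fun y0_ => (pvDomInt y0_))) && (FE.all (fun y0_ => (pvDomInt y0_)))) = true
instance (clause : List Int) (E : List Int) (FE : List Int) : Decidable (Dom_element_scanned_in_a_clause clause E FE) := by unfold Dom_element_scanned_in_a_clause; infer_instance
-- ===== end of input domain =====

-- B builds frequency tables over absolute values once and returns a dot-product over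
-- the clause's distinct abs-values, instead of A's per-literal scans of E and FE (faster).

-- ===== PORT A =====
def element_scanned_in_a_clause (clause : List Int) (E : List Int) (FE : List Int) : Int :=
  clause.foldl (fun counter literal =>
    let c1 := E.foldl (fun c el => if |el| = |literal| then c + 1 else c) counter
    FE.foldl (fun c el => if |el| = |literal| then c + 1 else c) c1) 0

-- ===== PORT B =====
def element_scanned_in_a_clause_alt (clause : List Int) (E : List Int) (FE : List Int) : Int :=
  let cl := clause.foldl (fun d l => d.insert (|l|) (d.getD (|l|) 0 + 1)) PySem.Dict.empty
  let tabE := E.foldl (fun d x => d.insert (|x|) (d.getD (|x|) 0 + 1)) PySem.Dict.empty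
  let tab := FE.foldl (fun d x => d.insert (|x|) (d.getD (|x|) 0 + 1)) tabE
  (cl.items.map (fun p => p.2 * tab.getD p.1 0)).sum

-- ===== PRECONDITION & SPEC =====
def Spec_element_scanned_in_a_clause (clause : List Int) (E : List Int) (FE : List Int) (out : Int) : Prop := out = element_scanned_in_a_clause_alt clause E FE
instance (clause : List Int) (E : List Int) (FE : List Int) (out : Int) : Decidable (Spec_element_scanned_in_a_clause clause E FE out) := by unfold Spec_element_scanned_in_a_clause; infer_instance

-- ===== CLAIM (what is proved, stated in full; the proofs are below) =====
def Claim_equal_element_scanned_in_a_clause : Prop := ∀ (clause : List Int) (E : List Int) (FE : List Int), Dom_element_scanned_in_a_clause clause E FE → Spec_element_scanned_in_a_clause clause E FE (element_scanned_in_a_clause clause E FE)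

-- ===== LEMMAS AND PROOFS =====

-- one inner scan of A adds the number of abs-matches to the accumulator
theorem pv_inner_scan (v : Int) (xs : List Int) (c : Int) :
    xs.foldl (fun c el => if |el| = v then c + 1 else c) c
      = c + ((xs.map (fun x => |x|)).count v : Int) := by
  induction xs generalizing c with
  | nil => simp
  | cons x xs ih =>
    simp only [List.foldl_cons, List.map_cons, ih]
    by_cases h : |x| = v
    · simp [h]; ring
    · simp [h]

theorem pv_foldl_shift (g h : Int → Int) (L : List Int) (c : Int) :
    L.foldl (fun acc l => acc + g l + h l) c = c + (L.map (fun l => g l + h l)).sum := by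
  induction L generalizing c with
  | nil => simp
  | cons a L ih => simp only [List.foldl_cons, List.map_cons, List.sum_cons, ih]; ring

-- A computes the sum over clause literals of the abs-match counts in E ++ FE
theorem pv_A_eq_sum (clause E FE : List Int) :
    element_scanned_in_a_clause clause E FE
      = ((clause.map (fun l => |l|)).map
          (fun v => (((E ++ FE).map (fun x => |x|)).count v : Int))).sum := by
  unfold element_scanned_in_a_clause
  simp only [pv_inner_scan]
  rw [pv_foldl_shift (fun l => (((E.map (fun x => |x|)).count |l| : Nat) : Int))
        (fun l => (((FE.map (fun x => |x|)).count |l| : Nat) : Int))]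
  simp only [List.map_map, Function.comp_def, List.map_append, List.count_append, zero_add]
  induction clause with
  | nil => simp
  | cons a l ih => simp only [List.map_cons, List.sum_cons] at ih ⊢; rw [← ih]; push_cast; ring

-- pushing abs into the key equals folding over the abs-mapped list
theorem pv_fold_abs (xs : List Int) (d : PySem.Dict Int Int) :
    xs.foldl (fun d l => d.insert (|l|) (d.getD (|l|) 0 + 1)) d
      = (xs.map (fun y => |y|)).foldl (fun d x => d.insert x (d.getD x 0 + 1)) d := by
  induction xs generalizing d with
  | nil => rfl
  | cons x xs ih => simp only [List.foldl_cons, List.map_cons, ih]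

-- sum of f over a list equals the count-weighted sum of f over its distinct elements
theorem pv_sum_dedup (m : List Int) (f : Int → Int) :
    ((PySem.Set.ofList m).map (fun v => (m.count v : Int) * f v)).sum
      = (m.map f).sum := by
  have hnd : (PySem.Set.ofList m).Nodup := PySem.Set.nodup_ofList m
  have htf : (PySem.Set.ofList m).toFinset = m.toFinset := by
    ext x; simp [PySem.Set.mem_ofList]
  rw [← List.sum_toFinset _ hnd, htf, Finset.sum_list_map_count]
  refine Finset.sum_congr rfl (fun v hv => ?_)
  rw [nsmul_eq_mul]

-- ===== VERDICT (by name: the statement is the Claim_ definition above) =====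
theorem element_scanned_in_a_clause_spec : Claim_equal_element_scanned_in_a_clause := by
  intro clause E FE _
  unfold Spec_element_scanned_in_a_clause element_scanned_in_a_clause_alt
  rw [pv_A_eq_sum]
  simp only []
  rw [pv_fold_abs, pv_fold_abs, pv_fold_abs,
      PySem.Dict.foldl_insert_getD_add_one_eq_counter,
      PySem.Dict.foldl_insert_getD_add_one_eq_counter,
      PySem.Dict.items_counter]
  rw [← pv_sum_dedup (clause.map (fun l => |l|))
        (fun v => (((E ++ FE).map (fun x => |x|)).count v : Int)), List.map_map]
  refine congrArg List.sum (List.map_congr_left (fun v hv => ?_))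
  simp only [Function.comp_def, PySem.Dict.getD_foldl_insert_add_one, PySem.Dict.getD_counter,
    List.count_append, List.map_append]
  push_cast
  ring
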